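-- pv_equiv track=rewrite | github.com/nrogachev/aoc2024 | day02/day02.py | check_report_safe
-- ===== SOURCE A (Python) =====
-- def check_report_safe(report):
--     previous_direction = 0
--     for i in range(1, len(report)):
--         if abs(report[i]-report[i-1]) < 1 or abs(report[i]-report[i-1]) > 3:
--             return False
--         direction = 1 if report[i] > report[i-1] else -1
--         if previous_direction != 0 and direction != previous_direction:
--             return False
--         previous_direction = direction
--     return True
-- ===== SOURCE B (Python) =====
-- def check_report_safe(report):
--     diffs = [report[i] - report[i - 1] for i in range(1, len(report))]
--     if not all(1 <= abs(d) <= 3 for d in diffs):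
--         return False
--     return all(d > 0 for d in diffs) or all(d < 0 for d in diffs)
-- ===== Notes on version B (the rewrite author's own statement) =====
-- stated objective: simpler
-- what changed: B materialises the adjacent-difference list once and replaces A's incremental previous_direction state machine with three uniform all() passes (magnitude, all positive, all negative).
import Mathlib
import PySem

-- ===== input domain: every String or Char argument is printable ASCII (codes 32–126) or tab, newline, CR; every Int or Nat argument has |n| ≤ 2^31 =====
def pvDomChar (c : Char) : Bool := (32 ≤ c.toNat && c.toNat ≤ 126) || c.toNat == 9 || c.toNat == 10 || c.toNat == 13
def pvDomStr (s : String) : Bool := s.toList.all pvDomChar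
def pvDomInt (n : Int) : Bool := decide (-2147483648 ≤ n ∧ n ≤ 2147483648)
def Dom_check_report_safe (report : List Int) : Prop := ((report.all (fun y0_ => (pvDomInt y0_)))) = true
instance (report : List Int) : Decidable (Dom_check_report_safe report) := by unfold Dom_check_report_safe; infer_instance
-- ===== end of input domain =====

-- B replaces A's index loop carrying a running previous_direction state machine by a
-- precomputed adjacent-difference list scanned by uniform all-passes (objective: simpler).

-- ===== PORT A =====
-- the for-loop over range(1, len(report)) with early returns, as index recursion;
-- indices i and i-1 are always in range here (1 ≤ i < len), so the .getD default is never taken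
def check_report_safe_loop (report : List Int) (i : Nat) (previous_direction : Int) : Bool :=
  if i < report.length then
    if |(PySem.List.pyGet? report (i : Int)).getD 0 - (PySem.List.pyGet? report ((i : Int) - 1)).getD 0| < 1 ∨
       |(PySem.List.pyGet? report (i : Int)).getD 0 - (PySem.List.pyGet? report ((i : Int) - 1)).getD 0| > 3 then
      false
    else if previous_direction ≠ 0 ∧
        (if (PySem.List.pyGet? report (i : Int)).getD 0 > (PySem.List.pyGet? report ((i : Int) - 1)).getD 0 then (1 : Int) else -1) ≠ previous_direction then
      false
    else
      check_report_safe_loop report (i + 1)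
        (if (PySem.List.pyGet? report (i : Int)).getD 0 > (PySem.List.pyGet? report ((i : Int) - 1)).getD 0 then (1 : Int) else -1)
  else true
termination_by report.length - i

def check_report_safe (report : List Int) : Bool :=
  check_report_safe_loop report 1 0

-- ===== PORT B =====
def check_report_safe_alt (report : List Int) : Bool :=
  let diffs := (PySem.List.pyRange 1 report.length 1).map
    (fun i => (PySem.List.pyGet? report i).getD 0 - (PySem.List.pyGet? report (i - 1)).getD 0)
  if ¬ diffs.all (fun d => decide (1 ≤ |d| ∧ |d| ≤ 3)) then false
  else diffs.all (fun d => decide (d > 0)) || diffs.all (fun d => decide (d < 0))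

-- ===== PRECONDITION & SPEC =====
def Spec_check_report_safe (report : List Int) (out : Bool) : Prop := out = check_report_safe_alt report
instance (report : List Int) (out : Bool) : Decidable (Spec_check_report_safe report out) := by unfold Spec_check_report_safe; infer_instance

-- ===== CLAIM (what is proved, stated in full; the proofs are below) =====
def Claim_equal_check_report_safe : Prop := ∀ (report : List Int), Dom_check_report_safe report → Spec_check_report_safe report (check_report_safe report)

-- ===== LEMMAS AND PROOFS =====

-- structural counterpart of A's loop: walk consecutive pairs carrying previous_direction
def checkPairs : List Int → Int → Bool
  | b :: a :: rest, prev =>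
    if |a - b| < 1 ∨ |a - b| > 3 then false
    else if prev ≠ 0 ∧ (if a > b then (1 : Int) else -1) ≠ prev then false
    else checkPairs (a :: rest) (if a > b then (1 : Int) else -1)
  | _, _ => true

-- the structural adjacent-difference list
def diffsOf : List Int → List Int
  | b :: a :: rest => (a - b) :: diffsOf (a :: rest)
  | _ => []

lemma loop_eq_checkPairs (report : List Int) (i : Nat) (prev : Int) (hi : 1 ≤ i) :
    check_report_safe_loop report i prev = checkPairs (report.drop (i - 1)) prev := by
  induction hn : report.length - i using Nat.strong_induction_on generalizing i prev with
  | _ n ih =>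
    rw [check_report_safe_loop]
    by_cases h : i < report.length
    · have h1 : i - 1 < report.length := by omega
      have ha : (PySem.List.pyGet? report (i : Int)).getD 0 = report[i] := by
        rw [PySem.List.pyGet?_natCast, List.getElem?_eq_getElem h]; rfl
      have hb : (PySem.List.pyGet? report ((i : Int) - 1)).getD 0 = report[i - 1] := by
        have hcast : ((i : Int) - 1) = ((i - 1 : Nat) : Int) := by omega
        rw [hcast, PySem.List.pyGet?_natCast, List.getElem?_eq_getElem h1]; rfl
      have hdrop : report.drop (i - 1) = report[i - 1] :: report[i] :: report.drop (i + 1) := by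
        rw [List.drop_eq_getElem_cons h1]
        congr 1
        have h2 : i - 1 + 1 = i := by omega
        rw [h2, List.drop_eq_getElem_cons h]
      rw [if_pos h, ha, hb, hdrop, checkPairs]
      by_cases hmag : |report[i] - report[i - 1]| < 1 ∨ |report[i] - report[i - 1]| > 3
      · rw [if_pos hmag, if_pos hmag]
      · rw [if_neg hmag, if_neg hmag]
        by_cases hd : prev ≠ 0 ∧ (if report[i] > report[i - 1] then (1 : Int) else -1) ≠ prev
        · rw [if_pos hd, if_pos hd]
        · rw [if_neg hd, if_neg hd,
            ih (report.length - (i + 1)) (by omega) (i + 1) _ (by omega) rfl,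
            Nat.add_sub_cancel, List.drop_eq_getElem_cons h]
    · rw [if_neg h]
      have hlen : (report.drop (i - 1)).length = report.length - (i - 1) :=
        List.length_drop
      cases hl : report.drop (i - 1) with
      | nil => rfl
      | cons x xs =>
        rw [hl] at hlen
        simp only [List.length_cons] at hlen
        rw [List.eq_nil_of_length_eq_zero (by omega : xs.length = 0)]
        rfl

lemma diffsOf_length (l : List Int) : (diffsOf l).length = l.length - 1 := by
  induction l with
  | nil => rfl
  | cons b tail ih =>
    cases tail with
    | nil => rfl
    | cons a rest =>
      simp only [diffsOf, List.length_cons] at *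
      omega

lemma diffsOf_getElem (l : List Int) (k : Nat) (h : k + 1 < l.length) :
    (diffsOf l)[k]'(by rw [diffsOf_length]; omega) = l[k + 1] - l[k] := by
  induction l generalizing k with
  | nil => simp at h
  | cons b tail ih =>
    cases tail with
    | nil => simp at h
    | cons a rest =>
      cases k with
      | zero => rfl
      | succ k' =>
        have h' : k' + 1 < (a :: rest).length := by
          simp only [List.length_cons] at h ⊢; omega
        simpa [diffsOf] using ih k' h'

-- B's mapped-range diffs equal the structural diffs
lemma diffs_map_eq (report : List Int) :
    (PySem.List.pyRange 1 report.length 1).map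
      (fun i => (PySem.List.pyGet? report i).getD 0 - (PySem.List.pyGet? report (i - 1)).getD 0)
    = diffsOf report := by
  apply List.ext_getElem
  · rw [List.length_map, PySem.List.length_pyRange_one, diffsOf_length]
    omega
  · intro k h1 h2
    have hk : k + 1 < report.length := by
      rw [diffsOf_length] at h2
      rw [List.length_map, PySem.List.length_pyRange_one] at h1
      omega
    rw [List.getElem_map, PySem.List.getElem_pyRange_one, diffsOf_getElem report k hk]
    have e1 : (1 : Int) + (k : Int) = ((k + 1 : Nat) : Int) := by push_cast; ring
    have e2 : ((k + 1 : Nat) : Int) - 1 = ((k : Nat) : Int) := by push_cast; ring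
    rw [e1, e2, PySem.List.pyGet?_natCast, PySem.List.pyGet?_natCast,
      List.getElem?_eq_getElem hk, List.getElem?_eq_getElem (by omega : k < report.length)]
    rfl

-- magnitude + direction characterisation of checkPairs for the three reachable prev values
lemma checkPairs_char (l : List Int) :
    (checkPairs l 1 = ((diffsOf l).all (fun d => decide (1 ≤ |d| ∧ |d| ≤ 3)) &&
        (diffsOf l).all (fun d => decide (d > 0)))) ∧
    (checkPairs l (-1) = ((diffsOf l).all (fun d => decide (1 ≤ |d| ∧ |d| ≤ 3)) &&
        (diffsOf l).all (fun d => decide (d < 0)))) ∧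
    (checkPairs l 0 = ((diffsOf l).all (fun d => decide (1 ≤ |d| ∧ |d| ≤ 3)) &&
        ((diffsOf l).all (fun d => decide (d > 0)) || (diffsOf l).all (fun d => decide (d < 0))))) := by
  induction l with
  | nil => exact ⟨rfl, rfl, rfl⟩
  | cons b tail ih =>
    cases tail with
    | nil => exact ⟨rfl, rfl, rfl⟩
    | cons a rest =>
      obtain ⟨ih1, ihm1, _⟩ := ih
      by_cases hmag : |a - b| < 1 ∨ |a - b| > 3
      · have hdec : decide (1 ≤ |a - b| ∧ |a - b| ≤ 3) = false := by
          simp only [decide_eq_false_iff_not]; omega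
        refine ⟨?_, ?_, ?_⟩ <;>
          (rw [checkPairs, if_pos hmag]
           simp only [diffsOf, List.all_cons, hdec, Bool.false_and])
      · have hdec : decide (1 ≤ |a - b| ∧ |a - b| ≤ 3) = true := by
          simp only [decide_eq_true_eq]; omega
        by_cases hab : a > b
        · have hpos : decide (a - b > 0) = true := by
            simp only [decide_eq_true_eq]; omega
          have hneg : decide (a - b < 0) = false := by
            simp only [decide_eq_false_iff_not]; omega
          refine ⟨?_, ?_, ?_⟩
          · rw [checkPairs, if_neg hmag, if_pos hab,
              if_neg (by simp : ¬((1 : Int) ≠ 0 ∧ (1 : Int) ≠ 1)), ih1]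
            simp only [diffsOf, List.all_cons, hdec, hpos, Bool.true_and]
          · rw [checkPairs, if_neg hmag, if_pos hab,
              if_pos (by norm_num : (-1 : Int) ≠ 0 ∧ (1 : Int) ≠ -1)]
            simp only [diffsOf, List.all_cons, hneg, Bool.false_and, Bool.and_false]
          · rw [checkPairs, if_neg hmag, if_pos hab,
              if_neg (by simp : ¬((0 : Int) ≠ 0 ∧ (1 : Int) ≠ 0)), ih1]
            simp only [diffsOf, List.all_cons, hdec, hpos, hneg, Bool.true_and,
              Bool.false_and, Bool.or_false]
        · have hab2 : a ≤ b := not_lt.mp hab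
          have hne : a - b ≠ 0 := by
            intro h0
            exact hmag (Or.inl (by rw [h0]; simp))
          have hpos : decide (a - b > 0) = false := by
            simp only [decide_eq_false_iff_not]; omega
          have hneg : decide (a - b < 0) = true := by
            simp only [decide_eq_true_eq]; omega
          refine ⟨?_, ?_, ?_⟩
          · rw [checkPairs, if_neg hmag, if_neg hab,
              if_pos (by norm_num : (1 : Int) ≠ 0 ∧ (-1 : Int) ≠ 1)]
            simp only [diffsOf, List.all_cons, hpos, Bool.false_and, Bool.and_false]
          · rw [checkPairs, if_neg hmag, if_neg hab,
              if_neg (by simp : ¬((-1 : Int) ≠ 0 ∧ (-1 : Int) ≠ -1)), ihm1]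
            simp only [diffsOf, List.all_cons, hdec, hneg, Bool.true_and]
          · rw [checkPairs, if_neg hmag, if_neg hab,
              if_neg (by simp : ¬((0 : Int) ≠ 0 ∧ (-1 : Int) ≠ 0)), ihm1]
            simp only [diffsOf, List.all_cons, hdec, hpos, hneg, Bool.true_and,
              Bool.false_and, Bool.false_or]

-- ===== VERDICT (by name: the statement is the Claim_ definition above) =====
theorem check_report_safe_spec : Claim_equal_check_report_safe := by
  intro report _
  unfold Spec_check_report_safe check_report_safe check_report_safe_alt
  rw [loop_eq_checkPairs report 1 0 (le_refl 1)]
  simp only [diffs_map_eq, Nat.sub_self, List.drop_zero]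
  rw [(checkPairs_char report).2.2]
  cases hall : (diffsOf report).all (fun d => decide (1 ≤ |d| ∧ |d| ≤ 3)) with
  | false => rw [if_pos (by simp), Bool.false_and]
  | true => rw [if_neg (by simp), Bool.true_and]
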